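-- pv_equiv track=rewrite | github.com/amarbalu5/Contrib_PB | deploy_v1.py | filter_results_by_hierarchy
-- ===== SOURCE A (Python) =====
-- from typing import List, Dict, Any, Optional, Tuple
--
-- def filter_results_by_hierarchy(results: List[Dict], hierarchy_filters: Dict) -> List[Dict]:
--     """Filter results based on hierarchy selections"""
--     filtered_results = []
--
--     for result in results:
--         include = True
--         for filter_col, filter_values in hierarchy_filters.items():
--             if filter_values and result.get(filter_col) not in filter_values:
--                 include = False
--                 break
--
--         if include:
--             filtered_results.append(result)
--
--     return filtered_results
-- ===== SOURCE B (Python) =====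
-- def filter_results_by_hierarchy(results, hierarchy_filters):
--     """Filter results based on hierarchy selections (progressive narrowing per filter)"""
--     filtered = list(results)
--     for col, vals in hierarchy_filters.items():
--         if vals:
--             filtered = [r for r in filtered if r.get(col) in vals]
--     return filtered
-- ===== Notes on version B (the rewrite author's own statement) =====
-- stated objective: simpler
-- what changed: Loop interchange: instead of testing every filter inside a per-result loop with include/break flags, B narrows the result list once per filter column with a comprehension, skipping falsy value lists.
import Mathlib
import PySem

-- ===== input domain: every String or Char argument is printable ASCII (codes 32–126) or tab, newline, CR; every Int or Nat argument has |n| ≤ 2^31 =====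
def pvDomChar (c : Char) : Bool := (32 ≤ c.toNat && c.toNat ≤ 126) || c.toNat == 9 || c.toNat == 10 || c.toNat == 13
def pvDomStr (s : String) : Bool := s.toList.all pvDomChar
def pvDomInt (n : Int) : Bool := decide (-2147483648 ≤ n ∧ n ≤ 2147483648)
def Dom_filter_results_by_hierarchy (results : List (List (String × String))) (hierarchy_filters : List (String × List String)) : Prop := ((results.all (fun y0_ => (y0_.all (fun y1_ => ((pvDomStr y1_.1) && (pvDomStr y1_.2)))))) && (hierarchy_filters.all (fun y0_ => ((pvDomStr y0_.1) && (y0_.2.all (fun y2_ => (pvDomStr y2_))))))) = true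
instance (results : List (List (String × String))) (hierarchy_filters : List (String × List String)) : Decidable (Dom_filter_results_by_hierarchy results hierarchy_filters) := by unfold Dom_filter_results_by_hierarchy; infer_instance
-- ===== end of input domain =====

-- B replaces the per-result inner filter loop (include flag + break) by progressive
-- narrowing: one filtering sweep over the result list per non-empty filter; same cost, simpler.

-- shared helper: Python's dict.get(k) on an association list (first match, None if absent)
def pvGet (r : List (String × String)) (k : String) : Option String :=
  match r with
  | [] => none
  | (k', v) :: t => if k' == k then some v else pvGet t k

-- ===== PORT A =====
-- inner 'for filter_col, filter_values …: if filter_values and … not in …: include = False; break'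
def pvIncludeA (r : List (String × String)) (fs : List (String × List String)) : Bool :=
  match fs with
  | [] => true
  | (c, vs) :: t =>
    if vs ≠ [] && !(match pvGet r c with | some v => vs.contains v | none => false) then
      false
    else pvIncludeA r t

def filter_results_by_hierarchy (results : List (List (String × String))) (hierarchy_filters : List (String × List String)) : List (List (String × String)) :=
  results.foldl (fun acc r => if pvIncludeA r hierarchy_filters then acc ++ [r] else acc) []

-- ===== PORT B =====
def filter_results_by_hierarchy_alt (results : List (List (String × String))) (hierarchy_filters : List (String × List String)) : List (List (String × String)) :=
  hierarchy_filters.foldl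
    (fun filtered cv =>
      if cv.2 ≠ [] then
        filtered.filter (fun r => match pvGet r cv.1 with | some v => cv.2.contains v | none => false)
      else filtered)
    results

-- ===== PRECONDITION & SPEC =====
def Spec_filter_results_by_hierarchy (results : List (List (String × String))) (hierarchy_filters : List (String × List String)) (out : List (List (String × String))) : Prop := out = filter_results_by_hierarchy_alt results hierarchy_filters
instance (results : List (List (String × String))) (hierarchy_filters : List (String × List String)) (out : List (List (String × String))) : Decidable (Spec_filter_results_by_hierarchy results hierarchy_filters out) := by unfold Spec_filter_results_by_hierarchy; infer_instance

-- ===== CLAIM (what is proved, stated in full; the proofs are below) =====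
def Claim_equal_filter_results_by_hierarchy : Prop := ∀ (results : List (List (String × String))) (hierarchy_filters : List (String × List String)), Dom_filter_results_by_hierarchy results hierarchy_filters → Spec_filter_results_by_hierarchy results hierarchy_filters (filter_results_by_hierarchy results hierarchy_filters)

-- ===== LEMMAS AND PROOFS =====


-- keep(r, fs): r passes all the (nonempty) filters in fs
def pvKeep (r : List (String × String)) (fs : List (String × List String)) : Bool :=
  fs.all (fun cv => !(cv.2 ≠ []) || (match pvGet r cv.1 with | some v => cv.2.contains v | none => false))

theorem includeA_eq_keep (r : List (String × String)) (fs : List (String × List String)) :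
    pvIncludeA r fs = pvKeep r fs := by
  induction fs with
  | nil => rfl
  | cons cv t ih =>
    obtain ⟨c, vs⟩ := cv
    simp only [pvIncludeA, pvKeep, List.all_cons] at *
    cases hm : (match pvGet r c with | some v => vs.contains v | none => false) <;>
      by_cases hv : vs = [] <;> simp_all

theorem alt_eq_filter_keep (results : List (List (String × String))) (fs : List (String × List String)) :
    filter_results_by_hierarchy_alt results fs = results.filter (fun r => pvKeep r fs) := by
  induction fs generalizing results with
  | nil => simp [filter_results_by_hierarchy_alt, pvKeep]
  | cons cv t ih =>
    obtain ⟨c, vs⟩ := cv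
    simp only [filter_results_by_hierarchy_alt, List.foldl_cons] at *
    rw [ih]
    by_cases h : vs = []
    · subst h; simp [pvKeep]
    · simp only [h, ne_eq, not_false_eq_true, if_pos, List.filter_filter]
      apply List.filter_congr
      intro r _
      simp [pvKeep, h, Bool.and_comm]

-- ===== VERDICT (by name: the statement is the Claim_ definition above) =====
theorem filter_results_by_hierarchy_spec : Claim_equal_filter_results_by_hierarchy := by
  intro results fs _
  unfold Spec_filter_results_by_hierarchy filter_results_by_hierarchy
  rw [alt_eq_filter_keep]
  rw [show (fun acc r => if pvIncludeA r fs then acc ++ [r] else acc)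
        = (fun (acc : List (List (String × String))) r => if (fun x => pvIncludeA x fs) r then acc ++ [r] else acc) from rfl,
      PySem.List.foldl_append_if_eq_filter]
  simp only [List.nil_append]
  exact List.filter_congr (fun r _ => includeA_eq_keep r fs)
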